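-- pv_equiv track=rewrite | github.com/FusionSid/Code-Cave-Challenges | challenge15/main.py | wordrank
-- ===== SOURCE A (Python) =====
-- def wordrank(text: str) -> str:
--     text = text.upper().replace(".", "")
--     words = dict(zip(text.split(), [0 for i in range(len(text))]))
--     for key in words:
--         total = 0
--         for char in key:
--             total += ord(char) - 64
--         words[key] = total
--     word = sorted(words)[0].lower()
--     return word
-- ===== SOURCE B (Python) =====
-- def wordrank(text: str) -> str:
--     words = text.upper().replace(".", "").split()
--     best = words[0]
--     for w in words[1:]:
--         if w < best:
--             best = w
--     return best.lower()
-- ===== Notes on version B (the rewrite author's own statement) =====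
-- stated objective: faster
-- what changed: B drops A's dict construction, dead letter-score loop and full sort, and selects the alphabetically smallest word with a single running-minimum scan over the word list.
import Mathlib
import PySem

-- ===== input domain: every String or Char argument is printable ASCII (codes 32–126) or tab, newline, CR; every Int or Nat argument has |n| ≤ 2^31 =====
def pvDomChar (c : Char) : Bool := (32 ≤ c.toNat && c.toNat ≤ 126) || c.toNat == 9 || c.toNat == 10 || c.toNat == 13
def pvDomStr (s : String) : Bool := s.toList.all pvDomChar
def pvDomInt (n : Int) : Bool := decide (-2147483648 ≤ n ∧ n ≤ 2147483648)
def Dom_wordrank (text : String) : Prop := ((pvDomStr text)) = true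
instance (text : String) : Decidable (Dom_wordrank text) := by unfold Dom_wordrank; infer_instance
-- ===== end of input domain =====

-- B replaces A's dict + dead letter-total loop + full sort by a single running-minimum scan (simpler); return value only.

-- ===== PORT A =====
def wordrank (text : String) : String :=
  let t := PySem.Str.replace (PySem.Str.upper text) "." ""
  let words : PySem.Dict String Int :=
    PySem.Dict.ofList ((PySem.Str.split₀ t).zip
      ((PySem.List.pyRange 0 (PySem.Str.len t) 1).map (fun _ => (0 : Int))))
  let words2 :=
    words.keys.foldl (fun (d : PySem.Dict String Int) key =>
      d.insert key (key.toList.foldl (fun total c => total + ((c.toNat : Int) - 64)) 0)) words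
  PySem.Str.lower (PySem.List.pyGetD (PySem.List.sorted words2.keys (fun x => x) false) 0 "")

-- ===== PORT B =====
def wordrank_alt (text : String) : String :=
  let words := PySem.Str.split₀ (PySem.Str.replace (PySem.Str.upper text) "." "")
  let best := PySem.List.pyGetD words 0 ""
  let best := (PySem.List.slice words (some 1) none).foldl (fun best w => if w < best then w else best) best
  PySem.Str.lower best

-- ===== PRECONDITION & SPEC =====
-- Pre_ excludes exactly the inputs with no word after removing periods, where both A and B raise IndexError.
def Pre_wordrank (text : String) : Prop :=
  PySem.Str.split₀ (PySem.Str.replace (PySem.Str.upper text) "." "") ≠ []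
instance (text : String) : Decidable (Pre_wordrank text) := by unfold Pre_wordrank; infer_instance
def pvWitness_wordrank : String := "The quick. brown Fox"

def Spec_wordrank (text : String) (out : String) : Prop := out = wordrank_alt text
instance (text : String) (out : String) : Decidable (Spec_wordrank text out) := by unfold Spec_wordrank; infer_instance

-- ===== CLAIM (what is proved, stated in full; the proofs are below) =====
def Claim_equal_wordrank : Prop := ∀ (text : String), Dom_wordrank text → Pre_wordrank text → Spec_wordrank text (wordrank text)

-- ===== LEMMAS AND PROOFS =====

-- the number of whitespace-separated words is at most the number of characters
theorem split₀_go_length_le (s cur : List Char) (acc : List (List Char)) :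
    (PySem.Chars.split₀.go s cur acc).length ≤
      acc.length + s.length + (if cur.isEmpty then 0 else 1) := by
  induction s generalizing cur acc with
  | nil =>
    simp only [PySem.Chars.split₀.go]
    split_ifs <;> simp
  | cons c rest ih =>
    simp only [PySem.Chars.split₀.go]
    by_cases h1 : PySem.Chars.isspace c = true
    · by_cases h2 : cur.isEmpty = true
      · have := ih [] acc; simp [h1, h2] at this ⊢; omega
      · have := ih [] (cur.reverse :: acc); simp [h1, h2] at this ⊢; omega
    · have := ih (c :: cur) acc
      simp [h1] at this ⊢
      split_ifs <;> omega

theorem split₀_length_le (s : List Char) : (PySem.Chars.split₀ s).length ≤ s.length := by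
  have := split₀_go_length_le s [] []
  simpa [PySem.Chars.split₀] using this

-- the running-minimum fold is a member of the list and a lower bound of it
theorem foldl_min_spec (rest : List String) (w : String) :
    (rest.foldl (fun best x => if x < best then x else best) w) ∈ w :: rest ∧
    ∀ y ∈ w :: rest, (rest.foldl (fun best x => if x < best then x else best) w) ≤ y := by
  induction rest generalizing w with
  | nil => simp
  | cons a rest ih =>
    simp only [List.foldl_cons]
    by_cases h : a < w
    · simp only [if_pos h]
      obtain ⟨hm, hb⟩ := ih a
      refine ⟨?_, fun y hy => ?_⟩
      · rcases List.mem_cons.mp hm with hm | hm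
        · exact List.mem_cons.mpr (Or.inr (List.mem_cons.mpr (Or.inl hm)))
        · exact List.mem_cons.mpr (Or.inr (List.mem_cons.mpr (Or.inr hm)))
      · rcases List.mem_cons.mp hy with hy | hy
        · exact hy ▸ le_trans (hb a (List.mem_cons.mpr (Or.inl rfl))) h.le
        · rcases List.mem_cons.mp hy with hy | hy
          · exact hy ▸ hb a (List.mem_cons.mpr (Or.inl rfl))
          · exact hb y (List.mem_cons.mpr (Or.inr hy))
    · simp only [if_neg h]
      obtain ⟨hm, hb⟩ := ih w
      refine ⟨?_, fun y hy => ?_⟩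
      · rcases List.mem_cons.mp hm with hm | hm
        · exact List.mem_cons.mpr (Or.inl hm)
        · exact List.mem_cons.mpr (Or.inr (List.mem_cons.mpr (Or.inr hm)))
      · rcases List.mem_cons.mp hy with hy | hy
        · exact hy ▸ hb w (List.mem_cons.mpr (Or.inl rfl))
        · rcases List.mem_cons.mp hy with hy | hy
          · exact hy ▸ le_trans (hb w (List.mem_cons.mpr (Or.inl rfl))) (le_of_not_gt h)
          · exact hb y (List.mem_cons.mpr (Or.inr hy))

-- membership in A's key list equals membership in the word list
theorem keys_eq_words (ws : List String) (zs : List Int) (hlen : ws.length ≤ zs.length) :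
    ∀ x, x ∈ (PySem.Dict.ofList (ws.zip zs) : PySem.Dict String Int).keys ↔ x ∈ ws := by
  intro x
  have h1 : (PySem.Dict.ofList (ws.zip zs) : PySem.Dict String Int) =
      (ws.zip zs).foldl (fun d p => d.insert p.1 p.2) PySem.Dict.empty := rfl
  rw [h1]
  have h2 := PySem.Dict.keys_foldl_insert_key (ws.zip zs) Prod.fst (fun _ p => p.2) (PySem.Dict.empty : PySem.Dict String Int)
  simp only [PySem.Dict.keys_empty] at h2
  have : ((ws.zip zs).foldl (fun (d : PySem.Dict String Int) p => d.insert p.1 p.2) PySem.Dict.empty).keys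
      = PySem.Set.update [] ((ws.zip zs).map Prod.fst) := h2
  rw [this, List.map_fst_zip hlen, PySem.Set.update_nil_left, PySem.Set.mem_ofList]

-- ===== VERDICT (by name: the statement is the Claim_ definition above) =====
theorem wordrank_spec : Claim_equal_wordrank := by
  intro text _ hpre
  unfold Spec_wordrank wordrank wordrank_alt
  dsimp only
  set t := PySem.Str.replace (PySem.Str.upper text) "." "" with ht
  set ws := PySem.Str.split₀ t with hws
  -- word list is nonempty
  obtain ⟨w, rest, hcons⟩ : ∃ w rest, ws = w :: rest := by
    cases h : ws with
    | nil => exact absurd h hpre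
    | cons a l => exact ⟨a, l, rfl⟩
  -- length bound: #words ≤ #chars = #zeros
  have hlen : ws.length ≤ ((PySem.List.pyRange 0 (PySem.Str.len t) 1).map (fun _ => (0 : Int))).length := by
    have h1 : ws.length = (PySem.Chars.split₀ t.toList).length := by
      simp [hws, PySem.Str.split₀]
    have h2 := split₀_length_le t.toList
    simp only [List.length_map, PySem.List.length_pyRange_one, PySem.Str.len]
    omega
  set zs := (PySem.List.pyRange 0 (PySem.Str.len t) 1).map (fun _ => (0 : Int)) with hzs
  set d := (PySem.Dict.ofList (ws.zip zs) : PySem.Dict String Int) with hd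
  -- keys of the updated dict = keys of d, membership-wise equal to ws
  have hkeys2 : ∀ x, x ∈ (d.keys.foldl (fun (dd : PySem.Dict String Int) key =>
      dd.insert key (key.toList.foldl (fun total c => total + ((c.toNat : Int) - 64)) 0)) d).keys ↔ x ∈ ws := by
    intro x
    rw [PySem.Dict.keys_foldl_insert d.keys
      (fun dd key => key.toList.foldl (fun total c => total + ((c.toNat : Int) - 64)) 0) d]
    have hmem := keys_eq_words ws zs hlen
    constructor
    · intro hx
      rcases (PySem.Set.mem_update _ _ _).mp hx with hx | hx <;> exact (hmem x).mp hx
    · intro hx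
      exact (PySem.Set.mem_update _ _ _).mpr (Or.inl ((hmem x).mpr hx))
  set keys := (d.keys.foldl (fun (dd : PySem.Dict String Int) key =>
      dd.insert key (key.toList.foldl (fun total c => total + ((c.toNat : Int) - 64)) 0)) d).keys with hk
  -- B's value: running minimum of ws
  set m := rest.foldl (fun best x => if x < best then x else best) w with hm
  obtain ⟨hmMem, hmMin⟩ := foldl_min_spec rest w
  rw [← hm] at hmMem hmMin
  -- A's sorted key list is nonempty
  obtain ⟨m', t', hsorted⟩ : ∃ m' t', PySem.List.sorted keys (fun x => x) false = m' :: t' := by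
    cases hs : PySem.List.sorted keys (fun x => x) false with
    | nil =>
      exfalso
      have : keys = [] := (PySem.List.sorted_eq_nil_iff keys _ _).mp hs
      have hw : w ∈ keys := (hkeys2 w).mpr (by simp [hcons])
      simp [this] at hw
    | cons a l => exact ⟨a, l, rfl⟩
  -- the two heads coincide
  have hm'mem : m' ∈ ws := by
    have : m' ∈ PySem.List.sorted keys (fun x => x) false := by simp [hsorted]
    exact (hkeys2 m').mp ((PySem.List.mem_sorted keys _ _ m').mp this)
  have h1 : m ≤ m' := hmMin m' (by rw [← hcons] at *; exact hm'mem)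
  have h2 : m' ≤ m := by
    have hmk : m ∈ keys := (hkeys2 m).mpr (by rw [← hcons] at hmMem; exact hmMem)
    exact PySem.List.key_head_sorted_le keys (fun x => x) hsorted m hmk
  have heq : m' = m := le_antisymm h2 h1
  -- finish
  rw [hsorted, PySem.List.pyGetD_zero_cons, heq, hcons]
  simp only [PySem.List.pyGetD_zero_cons, PySem.List.slice_from_one, List.tail_cons]
  exact congrArg PySem.Str.lower hm
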